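-- pv_equiv track=rewrite | github.com/DLANSAMA/Japanese-Learning | src/pitch.py | get_pitch_from_kernel
-- ===== SOURCE A (Python) =====
-- def get_pitch_from_kernel(kernel: int, num_moras: int) -> str:
--     """
--     Generates L/H pattern for a given accent kernel and number of moras.
--     kernel=0: Heiban (L H H H ...)
--     kernel=1: Atamadaka (H L L L ...)
--     kernel=k: Nakadaka/Odaka (L H ... H (at k) L ...)
--     """
--     if num_moras <= 0: return ""
--
--     pattern = []
--     for i in range(1, num_moras + 1):
--         if kernel == 0:
--             # Heiban: First mora Low, rest High.
--             # (Note: Monomoraic Heiban is technically Low, but particles attach High.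
--             #  In isolation, it's often perceived as High relative to nothing, but strictly it starts Low).
--             val = 'L' if i == 1 else 'H'
--         elif kernel == 1:
--             # Atamadaka: First mora High, rest Low.
--             val = 'H' if i == 1 else 'L'
--         else:
--             # Nakadaka/Odaka: Low start, High until kernel, then Low.
--             if i == 1:
--                 val = 'L'
--             elif i <= kernel:
--                 val = 'H'
--             else:
--                 val = 'L'
--         pattern.append(val)
--
--     return "".join(pattern)
-- ===== SOURCE B (Python) =====
-- def get_pitch_from_kernel(kernel: int, num_moras: int) -> str:
--     if num_moras <= 0:
--         return ""
--     if kernel == 0: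
--         return 'L' + 'H' * (num_moras - 1)
--     if kernel == 1:
--         return 'H' + 'L' * (num_moras - 1)
--     h = max(0, min(kernel, num_moras) - 1)
--     return 'L' + 'H' * h + 'L' * (num_moras - 1 - h)
-- ===== Notes on version B (the rewrite author's own statement) =====
-- stated objective: simpler
-- what changed: Replaces the per-mora branching loop with a closed-form construction: the three segment lengths are computed arithmetically and the pattern is built by string repetition and concatenation (bulk fills instead of per-character appends).
import Mathlib
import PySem

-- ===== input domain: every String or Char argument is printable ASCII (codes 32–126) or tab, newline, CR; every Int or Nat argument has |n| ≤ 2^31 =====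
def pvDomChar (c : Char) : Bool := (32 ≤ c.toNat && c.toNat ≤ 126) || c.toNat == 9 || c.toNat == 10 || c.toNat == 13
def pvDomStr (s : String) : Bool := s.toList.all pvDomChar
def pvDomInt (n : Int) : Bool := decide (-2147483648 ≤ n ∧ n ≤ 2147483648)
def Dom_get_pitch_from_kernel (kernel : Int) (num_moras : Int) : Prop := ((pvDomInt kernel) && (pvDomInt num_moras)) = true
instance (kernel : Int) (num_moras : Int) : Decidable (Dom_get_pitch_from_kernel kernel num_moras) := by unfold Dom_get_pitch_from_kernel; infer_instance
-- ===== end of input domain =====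

-- B builds the L/H pattern in closed form (segment lengths + repetition) instead of A's per-mora loop; simpler, same return value.

-- ===== PORT A =====
def get_pitch_from_kernel (kernel : Int) (num_moras : Int) : String :=
  if num_moras ≤ 0 then "" else
  let pattern : List Char :=
    (PySem.List.pyRange 1 (num_moras + 1) 1).foldl (fun acc i =>
      acc ++ [if kernel = 0 then (if i = 1 then 'L' else 'H')
              else if kernel = 1 then (if i = 1 then 'H' else 'L')
              else (if i = 1 then 'L' else if i ≤ kernel then 'H' else 'L')]) []
  String.mk pattern

-- ===== PORT B =====
def get_pitch_from_kernel_alt (kernel : Int) (num_moras : Int) : String :=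
  if num_moras ≤ 0 then "" else
  if kernel = 0 then String.mk ('L' :: List.replicate (num_moras - 1).toNat 'H') else
  if kernel = 1 then String.mk ('H' :: List.replicate (num_moras - 1).toNat 'L') else
  let h : Int := max 0 (min kernel num_moras - 1)
  String.mk ('L' :: (List.replicate h.toNat 'H' ++ List.replicate (num_moras - 1 - h).toNat 'L'))

-- ===== PRECONDITION & SPEC =====
def Spec_get_pitch_from_kernel (kernel : Int) (num_moras : Int) (out : String) : Prop := out = get_pitch_from_kernel_alt kernel num_moras
instance (kernel : Int) (num_moras : Int) (out : String) : Decidable (Spec_get_pitch_from_kernel kernel num_moras out) := by unfold Spec_get_pitch_from_kernel; infer_instance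

-- ===== CLAIM (what is proved, stated in full; the proofs are below) =====
def Claim_equal_get_pitch_from_kernel : Prop := ∀ (kernel : Int) (num_moras : Int), Dom_get_pitch_from_kernel kernel num_moras → Spec_get_pitch_from_kernel kernel num_moras (get_pitch_from_kernel kernel num_moras)

-- ===== LEMMAS AND PROOFS =====

-- A's loop appends one char per iteration: the fold is a map over the range.
theorem foldl_append_singleton_eq_map {α β : Type} (f : α → β) (xs : List α) (init : List β) :
    xs.foldl (fun acc x => acc ++ [f x]) init = init ++ xs.map f := by
  induction xs generalizing init with
  | nil => simp
  | cons y ys ih => simp [List.foldl_cons, ih]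

-- Characterisation of a three-segment pattern as a map over List.range.
theorem map_range_three_seg (m h : Nat) (a b c : Char) (f : Nat → Char)
    (hhm : h + 1 ≤ m)
    (hf0 : f 0 = a)
    (hfb : ∀ j, 1 ≤ j → j ≤ h → f j = b)
    (hfc : ∀ j, h + 1 ≤ j → j < m → f j = c) :
    (List.range m).map f = a :: (List.replicate h b ++ List.replicate (m - 1 - h) c) := by
  apply List.ext_getElem
  · simp; omega
  · intro i hi1 hi2
    simp at hi1
    rcases Nat.eq_zero_or_pos i with h0 | hpos
    · subst h0; simpa using hf0
    · have : i - 1 < (List.replicate h b ++ List.replicate (m - 1 - h) c).length := by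
        simp; omega
      rw [List.getElem_map, List.getElem_range, List.getElem_cons]
      split
      · omega
      · rw [List.getElem_append]
        split
        · rename_i hlt; rw [List.getElem_replicate]
          exact hfb i (by omega) (by simp at hlt; omega)
        · rename_i hge; rw [List.getElem_replicate]
          simp at hge
          exact hfc i (by omega) (by omega)

-- ===== VERDICT (by name: the statement is the Claim_ definition above) =====
theorem get_pitch_from_kernel_spec : Claim_equal_get_pitch_from_kernel := by
  intro kernel n _
  unfold Spec_get_pitch_from_kernel get_pitch_from_kernel get_pitch_from_kernel_alt
  by_cases hn : n ≤ 0
  · simp [hn]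
  · simp only [hn, if_false]
    push_neg at hn
    have hm : 0 < n.toNat := by omega
    rw [foldl_append_singleton_eq_map, List.nil_append,
        PySem.List.pyRange_one, show n + 1 - 1 = n from by ring, List.map_map]
    by_cases hk0 : kernel = 0
    · simp only [hk0, if_true]
      rw [map_range_three_seg n.toNat (n.toNat - 1) 'L' 'H' 'H'
            (fun j => _) (by omega)]
      · congr 1
        have : (n - 1).toNat = n.toNat - 1 := by omega
        simp [this]
      · simp
      · intro j hj1 hj2
        simp only [Function.comp]
        have : (1 : Int) + j ≠ 1 := by omega
        simp [this]
      · intro j hj1 hj2; omega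
    · simp only [hk0, if_false]
      by_cases hk1 : kernel = 1
      · simp only [hk1, if_true]
        rw [map_range_three_seg n.toNat 0 'H' 'H' 'L'
              (fun j => _) (by omega)]
        · congr 1
          have : (n - 1).toNat = n.toNat - 1 := by omega
          simp [this]
        · simp
        · intro j hj1 hj2; omega
        · intro j hj1 hj2
          simp only [Function.comp]
          have : (1 : Int) + j ≠ 1 := by omega
          simp [this]
      · simp only [hk1, if_false]
        set h : Int := max 0 (min kernel n - 1) with hh
        have hmc : min kernel n = kernel ∨ min kernel n = n := min_choice _ _
        have hxc : h = 0 ∨ h = min kernel n - 1 := max_choice 0 _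
        have hh0 : 0 ≤ h := le_max_left _ _
        have hhr : min kernel n - 1 ≤ h := le_max_right _ _
        have hmk : min kernel n ≤ kernel := min_le_left _ _
        have hmn : min kernel n ≤ n := min_le_right _ _
        rw [map_range_three_seg n.toNat h.toNat 'L' 'H' 'L'
              (fun j => _) (by omega)]
        · congr 2
          have : n.toNat - 1 - h.toNat = (n - 1 - h).toNat := by omega
          rw [this]
        · simp
        · intro j hj1 hj2
          simp only [Function.comp]
          have h1 : (1 : Int) + j ≠ 1 := by omega
          have h2 : (1 : Int) + j ≤ kernel := by omega
          simp [h1, h2]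
        · intro j hj1 hj2
          simp only [Function.comp]
          have h1 : (1 : Int) + j ≠ 1 := by omega
          have h2 : ¬ ((1 : Int) + j ≤ kernel) := by omega
          simp [h1, h2]
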